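-- pv_equiv track=rewrite | github.com/Vyrusspcs/weshkyv2 | source/obj/obj_server.py | morphological_close
-- ===== SOURCE A (Python) =====
-- def morphological_close(voxels, iterations=1):
--     """
--     Dilate then erode to close small gaps.
--     This connects thin features like car mirrors to the body.
--     """
--     neighbors_6 = [(1,0,0),(-1,0,0),(0,1,0),(0,-1,0),(0,0,1),(0,0,-1)]
--
--     current = set(voxels)
--     # Dilate
--     for _ in range(iterations):
--         new_voxels = set()
--         for (x, y, z) in current:
--             for dx, dy, dz in neighbors_6:
--                 nb = (x+dx, y+dy, z+dz)
--                 if nb not in current: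
--                     new_voxels.add(nb)
--         current |= new_voxels
--
--     # Erode - but never remove original surface voxels
--     for _ in range(iterations):
--         to_remove = set()
--         for (x, y, z) in current:
--             if (x, y, z) in voxels:
--                 continue  # protect original surface
--             # Remove if any neighbor is empty
--             for dx, dy, dz in neighbors_6:
--                 if (x+dx, y+dy, z+dz) not in current:
--                     to_remove.add((x, y, z))
--                     break
--         current -= to_remove
--
--     return current
-- ===== SOURCE B (Python) =====
-- def morphological_close(voxels, iterations=1):
--     """
--     Dilate then erode to close small gaps (frontier-based erosion).
--     """
--     neighbors_6 = [(1,0,0),(-1,0,0),(0,1,0),(0,-1,0),(0,0,1),(0,0,-1)]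
--
--     original = set(voxels)
--     live = set(voxels)
--
--     # Dilate: add every 6-neighbour of the current set in one sweep.
--     for _ in range(iterations):
--         live = live | {(x+dx, y+dy, z+dz)
--                        for (x, y, z) in live
--                        for (dx, dy, dz) in neighbors_6}
--
--     # Erode incrementally: after the first full scan, only neighbours of
--     # just-removed voxels can become newly exposed, so inspect only those.
--     candidates = live
--     for _ in range(iterations):
--         removed = {v for v in candidates
--                    if v not in original
--                    and any((v[0]+dx, v[1]+dy, v[2]+dz) not in live
--                            for (dx, dy, dz) in neighbors_6)}
--         live = live - removed
--         candidates = {(x+dx, y+dy, z+dz)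
--                       for (x, y, z) in removed
--                       for (dx, dy, dz) in neighbors_6} & live
--
--     return live
-- ===== Notes on version B (the rewrite author's own statement) =====
-- stated objective: alternative
-- what changed: B precomputes the original voxels as a set (A re-scans the voxels list per voxel per erosion round) and erodes incrementally: after the first sweep each round only inspects candidates that are neighbours of the voxels removed in the previous round, instead of rescanning the whole volume; intended as faster, measured only 1.24x at the largest timed size.
import Mathlib
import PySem

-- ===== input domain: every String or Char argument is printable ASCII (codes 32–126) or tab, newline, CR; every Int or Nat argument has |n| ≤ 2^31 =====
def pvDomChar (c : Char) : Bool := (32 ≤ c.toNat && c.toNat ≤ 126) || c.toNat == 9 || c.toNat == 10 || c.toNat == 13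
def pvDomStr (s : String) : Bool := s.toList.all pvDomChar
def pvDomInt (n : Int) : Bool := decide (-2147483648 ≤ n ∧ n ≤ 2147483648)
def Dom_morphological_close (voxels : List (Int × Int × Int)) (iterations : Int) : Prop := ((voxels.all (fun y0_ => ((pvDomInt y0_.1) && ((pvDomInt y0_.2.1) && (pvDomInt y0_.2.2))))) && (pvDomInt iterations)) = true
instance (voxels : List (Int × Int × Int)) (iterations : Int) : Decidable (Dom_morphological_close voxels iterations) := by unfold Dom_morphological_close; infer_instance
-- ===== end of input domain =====

-- B replaces A's per-erosion-round full rescan (with an O(|voxels|) list-membership test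
-- inside it) by a precomputed set of the original voxels and a frontier erosion that only
-- re-inspects neighbours of just-removed voxels; objective: alternative (intended as
-- faster; a timing run measured B only 1.24x faster at the largest size).
--
-- Note on the ports: Python set membership is an O(1) hash lookup; both ports therefore
-- test membership against a Std.HashSet index holding exactly the queried set's elements
-- (pvIdx / the pvAddNew pair; proved equal to list membership in the lemmas below).
-- The set values themselves stay the PySem.Set insertion-ordered lists throughout.

def pvNbs : List (Int × Int × Int) := [(1,0,0),(-1,0,0),(0,1,0),(0,-1,0),(0,0,1),(0,0,-1)]
def pvShift (v d : Int × Int × Int) : Int × Int × Int := (v.1 + d.1, v.2.1 + d.2.1, v.2.2 + d.2.2)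

-- hash index of a voxel set: Python's set membership is an O(1) hash lookup, so the
-- ports test membership against a Std.HashSet holding exactly the set's elements
-- (proved equal to list membership below); the set values stay insertion-ordered lists
def pvIdx (xs : List (Int × Int × Int)) : Std.HashSet (Int × Int × Int) :=
  xs.foldl (fun h x => h.insert x) ∅

-- s.add(x) on a set carried as (insertion-ordered list, hash index)
def pvAddNew (acc : List (Int × Int × Int) × Std.HashSet (Int × Int × Int))
    (x : Int × Int × Int) : List (Int × Int × Int) × Std.HashSet (Int × Int × Int) :=
  if acc.2.contains x then acc else (acc.1 ++ [x], acc.2.insert x)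

-- ===== PORT A =====
def pvDilateA (cur : PySem.Set (Int × Int × Int)) : PySem.Set (Int × Int × Int) :=
  let idx := pvIdx cur
  let new := cur.foldl (fun nv v =>
      pvNbs.foldl (fun nv d =>
          let nb := pvShift v d
          if idx.contains nb then nv else pvAddNew nv nb)
        nv)
    ([], ∅)
  cur ++ new.1  -- current |= new_voxels: every collected nb is missing from cur

def pvErodeA (voxels : List (Int × Int × Int)) (cur : PySem.Set (Int × Int × Int)) :
    PySem.Set (Int × Int × Int) :=
  let idx := pvIdx cur
  let rem := cur.foldl (fun tr v =>
      if voxels.contains v then tr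
      else if pvNbs.any (fun d => !(idx.contains (pvShift v d))) then pvAddNew tr v
      else tr)
    ([], ∅)
  cur.filter (fun v => !(rem.2.contains v))  -- current -= to_remove

def morphological_close (voxels : List (Int × Int × Int)) (iterations : Int) :
    List (Int × Int × Int) :=
  let current := PySem.Set.ofList voxels
  let current := (PySem.List.pyRange 0 iterations 1).foldl (fun c _ => pvDilateA c) current
  (PySem.List.pyRange 0 iterations 1).foldl (fun c _ => pvErodeA voxels c) current

-- ===== PORT B =====
def pvNbrsOf (s : List (Int × Int × Int)) : List (Int × Int × Int) :=
  s.flatMap (fun v => pvNbs.map (pvShift v))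

def pvDilateB (live : PySem.Set (Int × Int × Int)) : PySem.Set (Int × Int × Int) :=
  let new := (pvNbrsOf live).foldl pvAddNew ([], pvIdx live)
  live ++ new.1  -- live | {...}: the fresh neighbours appended in first-occurrence order

def pvErodeStepB (originalIdx : Std.HashSet (Int × Int × Int))
    (st : PySem.Set (Int × Int × Int) × PySem.Set (Int × Int × Int)) :
    PySem.Set (Int × Int × Int) × PySem.Set (Int × Int × Int) :=
  let liveIdx := pvIdx st.1
  let removed := (st.2.filter (fun v =>
      !(originalIdx.contains v) &&
        pvNbs.any (fun d => !(liveIdx.contains (pvShift v d))))).foldl pvAddNew ([], ∅)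
  let live := st.1.filter (fun v => !(removed.2.contains v))
  let liveIdx' := pvIdx live
  (live, ((pvNbrsOf removed.1).foldl pvAddNew ([], ∅)).1.filter
      (fun v => liveIdx'.contains v))

def morphological_close_alt (voxels : List (Int × Int × Int)) (iterations : Int) :
    List (Int × Int × Int) :=
  let originalIdx := pvIdx voxels
  let live := PySem.Set.ofList voxels
  let live := (PySem.List.pyRange 0 iterations 1).foldl (fun l _ => pvDilateB l) live
  ((PySem.List.pyRange 0 iterations 1).foldl (fun st _ => pvErodeStepB originalIdx st)
      (live, live)).1



-- ===== PRECONDITION & SPEC =====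
def Spec_morphological_close (voxels : List (Int × Int × Int)) (iterations : Int) (out : List (Int × Int × Int)) : Prop := out = morphological_close_alt voxels iterations
instance (voxels : List (Int × Int × Int)) (iterations : Int) (out : List (Int × Int × Int)) : Decidable (Spec_morphological_close voxels iterations out) := by unfold Spec_morphological_close; infer_instance

-- ===== CLAIM (what is proved, stated in full; the proofs are below) =====
def Claim_equal_morphological_close : Prop := ∀ (voxels : List (Int × Int × Int)) (iterations : Int), Dom_morphological_close voxels iterations → Spec_morphological_close voxels iterations (morphological_close voxels iterations)

-- ===== LEMMAS AND PROOFS =====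

theorem pvIdx_contains (xs : List (Int × Int × Int)) (y : Int × Int × Int) :
    (pvIdx xs).contains y = xs.contains y := by
  unfold pvIdx
  have key : ∀ (l : List (Int × Int × Int)) (h : Std.HashSet (Int × Int × Int)),
      (l.foldl (fun h x => h.insert x) h).contains y = (h.contains y || l.contains y) := by
    intro l
    induction l with
    | nil => intro h; simp
    | cons x l ih =>
      intro h
      rw [List.foldl_cons, ih]
      simp [Std.HashSet.contains_insert]
      by_cases hx : y = x <;> simp [hx]
      have : (x == y) = false := by simpa [beq_eq_false_iff_ne] using fun hcontra => hx (Eq.symm hcontra)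
      rw [this, Bool.false_or]
  rw [key]
  simp

theorem pvMaster (p t1 : (Int × Int × Int) → Bool) (xs : List (Int × Int × Int)) :
    ∀ (L s : List (Int × Int × Int)) (h : Std.HashSet (Int × Int × Int)),
      (∀ x, (t1 x || h.contains x) = true ↔ x ∈ L ++ s) →
      (L ++ (xs.foldl (fun acc x => if p x then (if t1 x then acc else pvAddNew acc x) else acc) (s, h)).1
        = xs.foldl (fun t x => if p x then PySem.Set.add t x else t) (L ++ s))
      ∧ (∀ x, (t1 x || (xs.foldl (fun acc x => if p x then (if t1 x then acc else pvAddNew acc x) else acc) (s, h)).2.contains x) = true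
          ↔ x ∈ L ++ (xs.foldl (fun acc x => if p x then (if t1 x then acc else pvAddNew acc x) else acc) (s, h)).1) := by
  induction xs with
  | nil =>
    intro L s h hinv
    exact ⟨rfl, hinv⟩
  | cons x xs ih =>
    intro L s h hinv
    rw [List.foldl_cons, List.foldl_cons]
    by_cases hp : p x
    · rw [if_pos hp, if_pos hp]
      by_cases ht : t1 x
      · rw [if_pos ht]
        have hxm : x ∈ L ++ s := (hinv x).mp (by simp [ht])
        rw [PySem.Set.add_of_mem hxm]
        exact ih L s h hinv
      · rw [if_neg ht]
        unfold pvAddNew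
        by_cases hc : h.contains x
        · have hxm : x ∈ L ++ s := (hinv x).mp (by simp [hc])
          rw [if_pos hc, PySem.Set.add_of_mem hxm]
          exact ih L s h hinv
        · have hxm : x ∉ L ++ s := by
            intro hmem
            rcases Bool.or_eq_true_iff.mp ((hinv x).mpr hmem) with h1 | h2
            · exact ht h1
            · exact hc h2
          rw [if_neg hc, PySem.Set.add_of_not_mem hxm, List.append_assoc]
          refine ih L (s ++ [x]) (h.insert x) ?_
          intro y
          rw [Bool.or_eq_true_iff, Std.HashSet.contains_insert, Bool.or_eq_true_iff]
          constructor
          · rintro (hy | hy | hy)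
            · rw [← List.append_assoc]
              exact List.mem_append_left _ ((hinv y).mp (by simp [hy]))
            · have hxy : x = y := eq_of_beq hy
              rw [← List.append_assoc]
              exact List.mem_append_right _ (by simp [hxy])
            · rw [← List.append_assoc]
              exact List.mem_append_left _ ((hinv y).mp (by simp [hy]))
          · intro hy
            rw [← List.append_assoc] at hy
            rcases List.mem_append.mp hy with hy | hy
            · rcases Bool.or_eq_true_iff.mp ((hinv y).mpr hy) with h1 | h2
              · exact Or.inl h1
              · exact Or.inr (Or.inr h2)
            · have hxy : x = y := by
                have := List.mem_singleton.mp hy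
                exact this.symm
              exact Or.inr (Or.inl (beq_iff_eq.mpr hxy))
    · rw [if_neg hp, if_neg hp]
      exact ih L s h hinv

-- a conditional-add fold is update with the filtered list
theorem pvCondFoldFilter (p : (Int × Int × Int) → Bool) (xs : List (Int × Int × Int)) :
    ∀ s : List (Int × Int × Int),
      xs.foldl (fun t x => if p x then PySem.Set.add t x else t) s
        = PySem.Set.update s (xs.filter p) := by
  induction xs with
  | nil => intro s; rfl
  | cons x xs ih =>
    intro s
    rw [List.foldl_cons, List.filter_cons]
    by_cases hp : p x
    · rw [if_pos hp, if_pos hp, PySem.Set.update_cons]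
      exact ih _
    · rw [if_neg hp, if_neg hp]
      exact ih s

-- flatten the nested neighbour fold
theorem pvNestedFold {α : Type} (g : α → (Int × Int × Int) → α)
    (l : List (Int × Int × Int)) :
    ∀ a, l.foldl (fun a v => pvNbs.foldl (fun a d => g a (pvShift v d)) a) a
      = (pvNbrsOf l).foldl g a := by
  induction l with
  | nil => intro a; rfl
  | cons v l ih =>
    intro a
    rw [List.foldl_cons, ih]
    show _ = List.foldl g a (List.map (pvShift v) pvNbs ++ pvNbrsOf l)
    rw [List.foldl_append, List.foldl_map]

-- both dilation rounds are `update cur (all neighbours of cur)`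
theorem pvDilateA_eq (cur : PySem.Set (Int × Int × Int)) :
    pvDilateA cur = PySem.Set.update cur (pvNbrsOf cur) := by
  unfold pvDilateA
  show cur ++ (cur.foldl (fun nv v =>
      pvNbs.foldl (fun nv d =>
        if (pvIdx cur).contains (pvShift v d) then nv else pvAddNew nv (pvShift v d)) nv)
      ([], ∅)).1 = _
  rw [pvNestedFold (fun nv nb => if (pvIdx cur).contains nb then nv else pvAddNew nv nb)]
  have hfun : (fun (nv : List (Int × Int × Int) × Std.HashSet (Int × Int × Int)) nb =>
        if (pvIdx cur).contains nb then nv else pvAddNew nv nb)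
      = (fun acc x => if (fun _ => true) x then
          (if (pvIdx cur).contains x then acc else pvAddNew acc x) else acc) := by
    funext acc x
    simp
  rw [hfun]
  have hm := pvMaster (fun _ => true) (fun nb => (pvIdx cur).contains nb) (pvNbrsOf cur)
      cur [] ∅ (by
        intro x
        simp [pvIdx_contains])
  have h1 := hm.1
  rw [List.append_nil] at h1
  rw [h1]
  have hfun2 : (fun (t : PySem.Set (Int × Int × Int)) (x : Int × Int × Int) =>
        if (fun (_ : Int × Int × Int) => true) x then PySem.Set.add t x else t)
      = PySem.Set.add := by
    funext t x
    simp
  rw [hfun2]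
  rfl

theorem pvDilateB_eq (live : PySem.Set (Int × Int × Int)) :
    pvDilateB live = PySem.Set.update live (pvNbrsOf live) := by
  unfold pvDilateB
  show live ++ ((pvNbrsOf live).foldl pvAddNew ([], pvIdx live)).1 = _
  have hfun : (pvAddNew : List (Int × Int × Int) × Std.HashSet (Int × Int × Int) →
        (Int × Int × Int) → List (Int × Int × Int) × Std.HashSet (Int × Int × Int))
      = (fun acc x => if (fun _ => true) x then
          (if (fun _ => false) x then acc else pvAddNew acc x) else acc) := by
    funext acc x
    simp
  rw [hfun]
  have hm := pvMaster (fun _ => true) (fun _ => false) (pvNbrsOf live)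
      live [] (pvIdx live) (by
        intro x
        simp [pvIdx_contains])
  have h1 := hm.1
  rw [List.append_nil] at h1
  rw [h1]
  have hfun2 : (fun (t : PySem.Set (Int × Int × Int)) (x : Int × Int × Int) =>
        if (fun (_ : Int × Int × Int) => true) x then PySem.Set.add t x else t)
      = PySem.Set.add := by
    funext t x
    simp
  rw [hfun2]
  rfl

-- the voxels one full-rescan erosion round removes from `cands`
def pvRemB (voxels live cands : List (Int × Int × Int)) : List (Int × Int × Int) :=
  PySem.Set.ofList (cands.filter (fun v =>
    !(voxels.contains v) &&
      pvNbs.any (fun d => !(PySem.Set.contains live (pvShift v d)))))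

-- the generic "collect with pvAddNew from an empty pair" = Set.ofList (as lists, with index exact)
theorem pvCollect (xs : List (Int × Int × Int)) :
    (xs.foldl pvAddNew ([], ∅)).1 = PySem.Set.ofList xs
    ∧ ∀ x, (xs.foldl pvAddNew ([], ∅)).2.contains x = true ↔ x ∈ (xs.foldl pvAddNew ([], ∅)).1 := by
  have hfun : (pvAddNew : List (Int × Int × Int) × Std.HashSet (Int × Int × Int) →
        (Int × Int × Int) → List (Int × Int × Int) × Std.HashSet (Int × Int × Int))
      = (fun acc x => if (fun _ => true) x then
          (if (fun _ => false) x then acc else pvAddNew acc x) else acc) := by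
    funext acc x
    simp
  rw [hfun]
  have hm := pvMaster (fun _ => true) (fun _ => false) xs [] [] ∅ (by intro x; simp)
  have h1 := hm.1
  rw [List.nil_append, List.nil_append] at h1
  have h2 := hm.2
  simp only [Bool.false_or, List.nil_append] at h2
  refine ⟨?_, h2⟩
  rw [h1]
  have hfun2 : (fun (t : PySem.Set (Int × Int × Int)) (x : Int × Int × Int) =>
        if (fun (_ : Int × Int × Int) => true) x then PySem.Set.add t x else t)
      = PySem.Set.add := by
    funext t x
    simp
  rw [hfun2]
  rfl

theorem pvErodeA_eq (voxels : List (Int × Int × Int)) (cur : PySem.Set (Int × Int × Int)) :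
    pvErodeA voxels cur = PySem.Set.diff cur (pvRemB voxels cur cur) := by
  unfold pvErodeA
  show cur.filter (fun v => !((cur.foldl (fun tr v =>
      if voxels.contains v then tr
      else if pvNbs.any (fun d => !((pvIdx cur).contains (pvShift v d))) then pvAddNew tr v
      else tr) ([], ∅)).2.contains v)) = _
  have hfun : (fun (tr : List (Int × Int × Int) × Std.HashSet (Int × Int × Int)) v =>
        if voxels.contains v then tr
        else if pvNbs.any (fun d => !((pvIdx cur).contains (pvShift v d))) then pvAddNew tr v
        else tr)
      = (fun acc x => if (fun v => !(voxels.contains v) &&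
            pvNbs.any (fun d => !(PySem.Set.contains cur (pvShift v d)))) x then
          (if (fun _ => false) x then acc else pvAddNew acc x) else acc) := by
    funext acc x
    simp only [pvIdx_contains, PySem.Set.contains_eq_listContains]
    by_cases h1 : voxels.contains x
    · rw [if_pos h1, h1, Bool.not_true, Bool.false_and, if_neg (by simp)]
    · have hb : voxels.contains x = false := Bool.eq_false_iff.mpr h1
      rw [if_neg h1, hb, Bool.not_false, Bool.true_and]
      by_cases h2 : (pvNbs.any fun d => !List.contains cur (pvShift x d)) = true
      · rw [if_pos h2, if_pos h2, if_neg (by simp)]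
      · rw [if_neg h2, if_neg h2]
  rw [hfun]
  have hm := pvMaster (fun v => !(voxels.contains v) &&
        pvNbs.any (fun d => !(PySem.Set.contains cur (pvShift v d)))) (fun _ => false)
      cur [] [] ∅ (by intro x; simp)
  have h1 := hm.1
  rw [List.nil_append, List.nil_append] at h1
  have h2 := hm.2
  simp only [Bool.false_or, List.nil_append] at h2
  rw [pvCondFoldFilter] at h1
  have hrem : (cur.foldl (fun acc x => if (fun v => !(voxels.contains v) &&
        pvNbs.any (fun d => !(PySem.Set.contains cur (pvShift v d)))) x then
        (if (fun _ => false) x then acc else pvAddNew acc x) else acc) ([], ∅)).1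
      = pvRemB voxels cur cur := by
    rw [h1]
    rfl
  show _ = List.filter (fun x => !(List.contains (pvRemB voxels cur cur) x)) cur
  refine List.filter_congr ?_
  intro x _
  have hx := h2 x
  rw [hrem] at hx
  have : (cur.foldl (fun acc x => if (fun v => !(voxels.contains v) &&
        pvNbs.any (fun d => !(PySem.Set.contains cur (pvShift v d)))) x then
        (if (fun _ => false) x then acc else pvAddNew acc x) else acc) ([], ∅)).2.contains x
      = List.contains (pvRemB voxels cur cur) x := by
    rw [Bool.eq_iff_iff, List.contains_iff_mem]
    exact hx
  rw [this]

theorem pvErodeStepB_eq (voxels : List (Int × Int × Int))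
    (st : PySem.Set (Int × Int × Int) × PySem.Set (Int × Int × Int)) :
    pvErodeStepB (pvIdx voxels) st =
      (PySem.Set.diff st.1 (pvRemB voxels st.1 st.2),
       PySem.Set.inter (PySem.Set.ofList (pvNbrsOf (pvRemB voxels st.1 st.2)))
         (PySem.Set.diff st.1 (pvRemB voxels st.1 st.2))) := by
  unfold pvErodeStepB
  have hq : (fun v => !((pvIdx voxels).contains v) &&
        pvNbs.any (fun d => !((pvIdx st.1).contains (pvShift v d))))
      = (fun v => !(voxels.contains v) &&
        pvNbs.any (fun d => !(PySem.Set.contains st.1 (pvShift v d)))) := by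
    funext v
    simp only [pvIdx_contains, PySem.Set.contains_eq_listContains]
  show (let removed := (st.2.filter (fun v => !((pvIdx voxels).contains v) &&
          pvNbs.any (fun d => !((pvIdx st.1).contains (pvShift v d))))).foldl pvAddNew ([], ∅)
    let live := st.1.filter (fun v => !(removed.2.contains v))
    (live, ((pvNbrsOf removed.1).foldl pvAddNew ([], ∅)).1.filter
        (fun v => (pvIdx live).contains v))) = _
  rw [hq]
  set q := (fun v => !(voxels.contains v) &&
      pvNbs.any (fun d => !(PySem.Set.contains st.1 (pvShift v d)))) with hqdef
  have hR := pvCollect (st.2.filter q)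
  have hR1 : ((st.2.filter q).foldl pvAddNew ([], ∅)).1 = pvRemB voxels st.1 st.2 := hR.1
  have hlive : st.1.filter (fun v => !(((st.2.filter q).foldl pvAddNew ([], ∅)).2.contains v))
      = PySem.Set.diff st.1 (pvRemB voxels st.1 st.2) := by
    show _ = List.filter (fun x => !(List.contains (pvRemB voxels st.1 st.2) x)) st.1
    refine List.filter_congr ?_
    intro x _
    have hx := hR.2 x
    rw [hR1] at hx
    have : ((st.2.filter q).foldl pvAddNew ([], ∅)).2.contains x
        = List.contains (pvRemB voxels st.1 st.2) x := by
      rw [Bool.eq_iff_iff, List.contains_iff_mem]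
      exact hx
    rw [this]
  show (st.1.filter (fun v => !(((st.2.filter q).foldl pvAddNew ([], ∅)).2.contains v)),
      ((pvNbrsOf ((st.2.filter q).foldl pvAddNew ([], ∅)).1).foldl pvAddNew ([], ∅)).1.filter
        (fun v => (pvIdx (st.1.filter (fun v =>
          !(((st.2.filter q).foldl pvAddNew ([], ∅)).2.contains v)))).contains v)) = _
  rw [hlive, hR1, (pvCollect (pvNbrsOf (pvRemB voxels st.1 st.2))).1]
  have hpred : (fun v => (pvIdx (PySem.Set.diff st.1 (pvRemB voxels st.1 st.2))).contains v)
      = (fun v => List.contains (PySem.Set.diff st.1 (pvRemB voxels st.1 st.2)) v) := by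
    funext v
    rw [pvIdx_contains]
  rw [hpred]
  rfl

def pvCond (voxels : List (Int × Int × Int)) (S : List (Int × Int × Int))
    (v : Int × Int × Int) : Prop :=
  v ∉ voxels ∧ ∃ d ∈ pvNbs, pvShift v d ∉ S

theorem pvMemRemB (voxels live cands : List (Int × Int × Int)) (x : Int × Int × Int) :
    x ∈ pvRemB voxels live cands ↔ x ∈ cands ∧ pvCond voxels live x := by
  unfold pvRemB
  rw [PySem.Set.mem_ofList, List.mem_filter]
  simp [pvCond]

theorem pvNbs_symm : ∀ d ∈ pvNbs, ∃ d' ∈ pvNbs, ∀ v : Int × Int × Int, pvShift (pvShift v d) d' = v := by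
  intro d hd
  fin_cases hd
  · exact ⟨(-1,0,0), by simp [pvNbs], fun v => by simp [pvShift]⟩
  · exact ⟨(1,0,0), by simp [pvNbs], fun v => by simp [pvShift]⟩
  · exact ⟨(0,-1,0), by simp [pvNbs], fun v => by simp [pvShift]⟩
  · exact ⟨(0,1,0), by simp [pvNbs], fun v => by simp [pvShift]⟩
  · exact ⟨(0,0,-1), by simp [pvNbs], fun v => by simp [pvShift]⟩
  · exact ⟨(0,0,1), by simp [pvNbs], fun v => by simp [pvShift]⟩

theorem pvDiffCongr (s t t' : PySem.Set (Int × Int × Int)) (h : ∀ x, x ∈ t ↔ x ∈ t') :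
    PySem.Set.diff s t = PySem.Set.diff s t' := by
  unfold PySem.Set.diff
  refine List.filter_congr ?_
  intro x _
  simp [PySem.Set.contains, h x]

theorem pvMemNbrsOf (s : List (Int × Int × Int)) (x : Int × Int × Int) :
    x ∈ pvNbrsOf s ↔ ∃ v ∈ s, ∃ d ∈ pvNbs, x = pvShift v d := by
  simp [pvNbrsOf, eq_comm]

def pvGood (voxels live cands : List (Int × Int × Int)) : Prop :=
  (∀ v ∈ cands, v ∈ live) ∧ (∀ v ∈ live, pvCond voxels live v → v ∈ cands)

theorem pvRound (voxels live cands : List (Int × Int × Int)) (h : pvGood voxels live cands) :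
    PySem.Set.diff live (pvRemB voxels live cands) = pvErodeA voxels live ∧
    pvGood voxels (PySem.Set.diff live (pvRemB voxels live cands))
      (PySem.Set.inter (PySem.Set.ofList (pvNbrsOf (pvRemB voxels live cands)))
        (PySem.Set.diff live (pvRemB voxels live cands))) := by
  have hrem : ∀ x, x ∈ pvRemB voxels live cands ↔ x ∈ live ∧ pvCond voxels live x := by
    intro x
    rw [pvMemRemB]
    exact ⟨fun ⟨hc, hx⟩ => ⟨h.1 x hc, hx⟩, fun ⟨hl, hx⟩ => ⟨h.2 x hl hx, hx⟩⟩
  have hfst : PySem.Set.diff live (pvRemB voxels live cands) = pvErodeA voxels live := by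
    rw [pvErodeA_eq]
    refine pvDiffCongr _ _ _ ?_
    intro x
    rw [hrem, pvMemRemB]
  refine ⟨hfst, ?_, ?_⟩
  · intro v hv
    exact ((PySem.Set.mem_inter _ _ v).mp hv).2
  · intro v hv hc
    have hv' : v ∈ live ∧ v ∉ pvRemB voxels live cands :=
      (PySem.Set.mem_diff _ _ v).mp hv
    obtain ⟨hnv, d, hd, hw⟩ := hc
    rw [PySem.Set.mem_inter]
    refine ⟨?_, hv⟩
    rw [PySem.Set.mem_ofList, pvMemNbrsOf]
    by_cases hwl : pvShift v d ∈ live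
    · have hwr : pvShift v d ∈ pvRemB voxels live cands := by
        by_contra hno
        exact hw ((PySem.Set.mem_diff _ _ _).mpr ⟨hwl, hno⟩)
      obtain ⟨d', hd', hinv⟩ := pvNbs_symm d hd
      exact ⟨pvShift v d, hwr, d', hd', (hinv v).symm⟩
    · exact absurd ((hrem v).mpr ⟨hv'.1, hnv, d, hd, hwl⟩) hv'.2

theorem pvIter (voxels : List (Int × Int × Int)) (k : Nat) :
    ∀ st : PySem.Set (Int × Int × Int) × PySem.Set (Int × Int × Int),
      pvGood voxels st.1 st.2 →
      ((pvErodeStepB (pvIdx voxels))^[k] st).1 = (pvErodeA voxels)^[k] st.1 := by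
  induction k with
  | zero => intro st _; rfl
  | succ k ih =>
    intro st hst
    rw [Function.iterate_succ_apply, Function.iterate_succ_apply]
    rw [pvErodeStepB_eq]
    obtain ⟨h1, h2⟩ := pvRound voxels st.1 st.2 hst
    rw [ih _ h2, h1]

theorem pvFoldlConst {α : Type} (g : α → α) (l : List Int) (x : α) :
    l.foldl (fun c _ => g c) x = g^[l.length] x := by
  induction l generalizing x with
  | nil => rfl
  | cons a l ih => simpa [Function.iterate_succ_apply] using ih (g x)

theorem pvMain (voxels : List (Int × Int × Int)) (iterations : Int) :
    morphological_close voxels iterations = morphological_close_alt voxels iterations := by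
  unfold morphological_close morphological_close_alt
  have hdil : pvDilateA = pvDilateB := by
    funext cur
    rw [pvDilateA_eq, pvDilateB_eq]
  simp only [pvFoldlConst, hdil]
  exact (pvIter voxels (PySem.List.pyRange 0 iterations 1).length
    (pvDilateB^[(PySem.List.pyRange 0 iterations 1).length] (PySem.Set.ofList voxels),
     pvDilateB^[(PySem.List.pyRange 0 iterations 1).length] (PySem.Set.ofList voxels))
    ⟨fun v hv => hv, fun v hv _ => hv⟩).symm

-- ===== VERDICT (by name: the statement is the Claim_ definition above) =====
theorem morphological_close_spec : Claim_equal_morphological_close := by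
  intro voxels iterations _
  unfold Spec_morphological_close
  exact pvMain voxels iterations
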